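-- pv_equiv track=rewrite | github.com/3060458966/vitaFlow | vitaflow/utils/registry.py | parse_dataset_name
-- ===== SOURCE A (Python) =====
-- import collections
--
-- DatasetSpec = collections.namedtuple("DatasetSpec",
--                                      ["base_name", "was_reversed", "was_copy"])
--
-- def parse_dataset_name(name):
--     """Determines if dataset_name specifies a copy and/or reversal.
--
--     Args:
--       name: str, dataset name, possibly with suffixes.
--
--     Returns:
--       datasetSpec: namedtuple with ["base_name", "was_reversed", "was_copy"]
--
--     Raises:
--       ValueError if name contains multiple suffixes of the same type
--         ('_rev' or '_copy'). One of each is ok.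
--     """
--     # Recursively strip tags until we reach a base name.
--     if name.endswith("_rev"):
--         base, was_reversed, was_copy = parse_dataset_name(name[:-4])
--         if was_reversed:
--             # duplicate rev
--             raise ValueError(
--                 "Invalid dataset name %s: multiple '_rev' instances" % name)
--         return DatasetSpec(base, True, was_copy)
--     elif name.endswith("_copy"):
--         base, was_reversed, was_copy = parse_dataset_name(name[:-5])
--         if was_copy:
--             raise ValueError(
--                 "Invalid dataset_name %s: multiple '_copy' instances" % name)
--         return DatasetSpec(base, was_reversed, True)
--     else:
--         return DatasetSpec(name, False, False)
-- ===== SOURCE B (Python) =====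
-- import collections
--
-- DatasetSpec = collections.namedtuple("DatasetSpec",
--                                      ["base_name", "was_reversed", "was_copy"])
--
-- # Table of the only legal suffix patterns, longest first.
-- _SUFFIX_TABLE = [
--     ("_rev_copy", True, True),
--     ("_copy_rev", True, True),
--     ("_rev", True, False),
--     ("_copy", False, True),
-- ]
--
-- def parse_dataset_name(name):
--     """Matches the name against the table of legal suffix patterns (longest
--     first) instead of recursing; a leftover tag on the base means a duplicate."""
--     for suffix, was_reversed, was_copy in _SUFFIX_TABLE:
--         if name.endswith(suffix):
--             base = name[:-len(suffix)]
--             if base.endswith("_rev"):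
--                 raise ValueError(
--                     "Invalid dataset name %s: multiple '_rev' instances" % name)
--             if base.endswith("_copy"):
--                 raise ValueError(
--                     "Invalid dataset_name %s: multiple '_copy' instances" % name)
--             return DatasetSpec(base, was_reversed, was_copy)
--     return DatasetSpec(name, False, False)
-- ===== Notes on version B (the rewrite author's own statement) =====
-- stated objective: alternative
-- what changed: Replaced the recursion with a direct match against the closed table of the five legal suffix patterns (longest first), raising if the remaining base still carries a tag.
import Mathlib
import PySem

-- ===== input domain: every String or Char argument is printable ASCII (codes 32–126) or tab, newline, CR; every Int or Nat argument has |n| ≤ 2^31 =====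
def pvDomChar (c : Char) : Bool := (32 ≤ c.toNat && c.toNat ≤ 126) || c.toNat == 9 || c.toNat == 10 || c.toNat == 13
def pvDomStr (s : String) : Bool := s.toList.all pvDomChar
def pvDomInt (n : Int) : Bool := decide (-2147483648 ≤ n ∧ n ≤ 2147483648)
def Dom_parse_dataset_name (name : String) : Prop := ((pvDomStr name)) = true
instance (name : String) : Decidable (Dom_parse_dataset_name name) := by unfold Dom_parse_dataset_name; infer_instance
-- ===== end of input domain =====

-- B replaces A's recursion by a direct match against the closed table of the five
-- legal suffix patterns (longest first); a leftover tag on the base means a duplicate.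
-- Equivalence is about return values; both raise ValueError outside Pre_ (messages differ).


-- a terminating suffix-strip shrinks the list (used by port A's termination proof)
theorem pv_strip_lt (cs p : List Char) (k : Nat) (h : PySem.Chars.endswith cs p = true)
    (hk : 0 < k) (hkp : k ≤ p.length) :
    (PySem.List.slice cs none (some (-(k : Int)))).length < cs.length := by
  have hs : p <:+ cs := (PySem.Chars.endswith_iff cs p).mp h
  have hlen : p.length ≤ cs.length := hs.length_le
  rw [PySem.List.slice_to_neg_natCast cs k hk]
  simp [List.length_take]
  omega

-- ===== PORT A =====
-- recursive strip, flags returned upward; the ValueError branches (outside Pre_) return ([], false, false)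
def pvA (cs : List Char) : List Char × Bool × Bool :=
  if h4 : PySem.Chars.endswith cs "_rev".toList then
    let r := pvA (PySem.List.slice cs none (some (-4)))      -- name[:-4]
    if r.2.1 then ([], false, false)                         -- raise ValueError (multiple '_rev')
    else (r.1, true, r.2.2)
  else if h5 : PySem.Chars.endswith cs "_copy".toList then
    let r := pvA (PySem.List.slice cs none (some (-5)))      -- name[:-5]
    if r.2.2 then ([], false, false)                         -- raise ValueError (multiple '_copy')
    else (r.1, r.2.1, true)
  else (cs, false, false)
termination_by cs.length
decreasing_by
  · exact pv_strip_lt cs "_rev".toList 4 h4 (by omega) (by decide)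
  · exact pv_strip_lt cs "_copy".toList 5 h5 (by omega) (by decide)

def parse_dataset_name (name : String) : String × Bool × Bool :=
  let r := pvA name.toList
  (String.ofList r.1, r.2.1, r.2.2)

-- ===== PORT B =====
-- base.endswith('_rev') / base.endswith('_copy'): a leftover tag on the base (duplicate → raise)
def pvTag (cs : List Char) : Bool :=
  PySem.Chars.endswith cs "_rev".toList || PySem.Chars.endswith cs "_copy".toList

-- one table row matched: base = name[:-len(suffix)]; raise (→ ("",false,false)) if base still tagged
def pvRow (base : List Char) (r c : Bool) : String × Bool × Bool :=
  if pvTag base then ("", false, false)                      -- raise ValueError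
  else (String.ofList base, r, c)

-- the for-loop over _SUFFIX_TABLE, unrolled as the four-row if-chain (longest first)
def parse_dataset_name_alt (name : String) : String × Bool × Bool :=
  let cs := name.toList
  if PySem.Chars.endswith cs "_rev_copy".toList then
    pvRow (PySem.List.slice cs none (some (-9))) true true
  else if PySem.Chars.endswith cs "_copy_rev".toList then
    pvRow (PySem.List.slice cs none (some (-9))) true true
  else if PySem.Chars.endswith cs "_rev".toList then
    pvRow (PySem.List.slice cs none (some (-4))) true false
  else if PySem.Chars.endswith cs "_copy".toList then
    pvRow (PySem.List.slice cs none (some (-5))) false true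
  else (name, false, false)

-- ===== PRECONDITION & SPEC =====
-- Pre_ excludes exactly the names carrying a duplicate '_rev' or '_copy' tag, on which
-- A raises ValueError (B raises there too): legal names are a clean base plus one of the
-- five legal suffix patterns '', '_rev', '_copy', '_rev_copy', '_copy_rev'.
def pvClean (cs : List Char) : Bool :=
  !PySem.Chars.endswith cs "_rev".toList && !PySem.Chars.endswith cs "_copy".toList

def Pre_parse_dataset_name (name : String) : Prop :=
  pvClean name.toList = true ∨
  (PySem.Chars.endswith name.toList "_rev_copy".toList = true ∧
    pvClean (PySem.List.slice name.toList none (some (-9))) = true) ∨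
  (PySem.Chars.endswith name.toList "_copy_rev".toList = true ∧
    pvClean (PySem.List.slice name.toList none (some (-9))) = true) ∨
  (PySem.Chars.endswith name.toList "_rev".toList = true ∧
    pvClean (PySem.List.slice name.toList none (some (-4))) = true) ∨
  (PySem.Chars.endswith name.toList "_copy".toList = true ∧
    pvClean (PySem.List.slice name.toList none (some (-5))) = true)

instance (name : String) : Decidable (Pre_parse_dataset_name name) := by
  unfold Pre_parse_dataset_name; infer_instance

def pvWitness_parse_dataset_name : String := "mnist_rev_copy"

def Spec_parse_dataset_name (name : String) (out : String × Bool × Bool) : Prop := out = parse_dataset_name_alt name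
instance (name : String) (out : String × Bool × Bool) : Decidable (Spec_parse_dataset_name name out) := by unfold Spec_parse_dataset_name; infer_instance

-- ===== CLAIM (what is proved, stated in full; the proofs are below) =====
def Claim_equal_parse_dataset_name : Prop := ∀ (name : String), Dom_parse_dataset_name name → Pre_parse_dataset_name name → Spec_parse_dataset_name name (parse_dataset_name name)

-- ===== LEMMAS AND PROOFS =====
theorem pv_toList_rev : "_rev".toList = ['_','r','e','v'] := rfl
theorem pv_toList_copy : "_copy".toList = ['_','c','o','p','y'] := rfl
theorem pv_toList_rc : "_rev_copy".toList = ['_','r','e','v','_','c','o','p','y'] := rfl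
theorem pv_toList_cr : "_copy_rev".toList = ['_','c','o','p','y','_','r','e','v'] := rfl

-- endswith as list suffix
theorem pv_ew (cs p : List Char) : PySem.Chars.endswith cs p = true ↔ p <:+ cs :=
  PySem.Chars.endswith_iff cs p

-- two suffixes of the same list of equal length are equal
theorem pv_suffix_eq (p q cs : List Char) (h1 : p <:+ cs) (h2 : q <:+ cs)
    (h : p.length = q.length) : p = q := by
  rcases List.suffix_or_suffix_of_suffix h1 h2 with h' | h'
  · exact h'.eq_of_length h
  · exact (h'.eq_of_length h.symm).symm

-- a list cannot end with both '_rev' and '_copy'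
theorem pv_conflict (cs : List Char) (h1 : ['_','r','e','v'] <:+ cs)
    (h2 : ['_','c','o','p','y'] <:+ cs) : False := by
  rcases List.suffix_or_suffix_of_suffix h1 h2 with h' | h' <;>
    simp [List.suffix_iff_eq_drop] at h'

-- name[:-k] on a list ending in a k-char tail
theorem pv_slice4 (a p : List Char) (hp : p.length = 4) :
    PySem.List.slice (a ++ p) none (some (-4)) = a := by
  rw [PySem.List.slice_to_neg_ofNat _ 4 (by omega)]
  simp [List.length_append, hp]
theorem pv_slice5 (a p : List Char) (hp : p.length = 5) :
    PySem.List.slice (a ++ p) none (some (-5)) = a := by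
  rw [PySem.List.slice_to_neg_ofNat _ 5 (by omega)]
  simp [List.length_append, hp]
theorem pv_slice9 (a p : List Char) (hp : p.length = 9) :
    PySem.List.slice (a ++ p) none (some (-9)) = a := by
  rw [PySem.List.slice_to_neg_ofNat _ 9 (by omega)]
  simp [List.length_append, hp]

-- A's recursion on a clean list returns immediately
theorem pvA_clean (cs : List Char) (h1 : PySem.Chars.endswith cs ['_','r','e','v'] = false)
    (h2 : PySem.Chars.endswith cs ['_','c','o','p','y'] = false) :
    pvA cs = (cs, false, false) := by
  rw [pvA]
  simp [pv_toList_rev, pv_toList_copy, h1, h2]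

theorem pv_clean_iff (cs : List Char) : pvClean cs = true ↔
    PySem.Chars.endswith cs ['_','r','e','v'] = false ∧
    PySem.Chars.endswith cs ['_','c','o','p','y'] = false := by
  simp [pvClean, pv_toList_rev, pv_toList_copy]

theorem pv_ew_append (a p : List Char) :
    PySem.Chars.endswith (a ++ p) p = true := by
  rw [pv_ew]; exact List.suffix_append a p

theorem parse_dataset_name_spec' (name : String) (hpre : Pre_parse_dataset_name name) :
    parse_dataset_name name = parse_dataset_name_alt name := by
  unfold parse_dataset_name parse_dataset_name_alt pvRow pvTag
  unfold Pre_parse_dataset_name at hpre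
  simp only [pv_clean_iff, pv_toList_rev, pv_toList_copy, pv_toList_rc, pv_toList_cr] at hpre
  rcases hpre with ⟨h1, h2⟩ | ⟨h9, hcl⟩ | ⟨h9, hcl⟩ | ⟨h4, hcl⟩ | ⟨h5, hcl⟩
  · -- clean: no tag at all
    have h3 : PySem.Chars.endswith name.toList ['_','r','e','v','_','c','o','p','y'] = false := by
      by_contra h; rw [Bool.not_eq_false, pv_ew] at h
      have : ['_','c','o','p','y'] <:+ name.toList := List.IsSuffix.trans (by decide) h
      rw [← pv_ew] at this; rw [this] at h2; cases h2
    have h4 : PySem.Chars.endswith name.toList ['_','c','o','p','y','_','r','e','v'] = false := by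
      by_contra h; rw [Bool.not_eq_false, pv_ew] at h
      have : ['_','r','e','v'] <:+ name.toList := List.IsSuffix.trans (by decide) h
      rw [← pv_ew] at this; rw [this] at h1; cases h1
    rw [pvA_clean _ h1 h2]
    simp [pv_toList_rev, pv_toList_copy, pv_toList_rc, pv_toList_cr, h1, h2, h3, h4]
  · -- name = a ++ '_rev_copy'
    rw [pv_ew] at h9; obtain ⟨a, ha⟩ := h9
    have hsl9 : PySem.List.slice name.toList none (some (-9)) = a := by
      rw [← ha]; exact pv_slice9 a _ rfl
    rw [hsl9] at hcl
    have hname : name.toList = (a ++ ['_','r','e','v']) ++ ['_','c','o','p','y'] := by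
      rw [← ha]; simp
    have hnr : PySem.Chars.endswith name.toList ['_','r','e','v'] = false := by
      by_contra h; rw [Bool.not_eq_false, pv_ew] at h
      have h' : ['c','o','p','y'] <:+ name.toList := by
        refine List.IsSuffix.trans ?_ ⟨a, ha⟩; decide
      have := pv_suffix_eq _ _ _ h h' (by decide)
      simp at this
    have hnc : PySem.Chars.endswith name.toList ['_','c','o','p','y'] = true := by
      rw [hname]; exact pv_ew_append _ _
    have hsl5 : PySem.List.slice name.toList none (some (-5)) = a ++ ['_','r','e','v'] := by
      rw [hname]; exact pv_slice5 _ _ rfl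
    have hsl4 : PySem.List.slice (a ++ ['_','r','e','v']) none (some (-4)) = a :=
      pv_slice4 _ _ rfl
    have h9' : PySem.Chars.endswith name.toList ['_','r','e','v','_','c','o','p','y'] = true := by
      rw [pv_ew]; exact ⟨a, ha⟩
    rw [pvA]
    simp only [pv_toList_rev, pv_toList_copy, hnr, Bool.false_eq_true, reduceDIte, hnc, hsl5]
    rw [pvA]
    simp only [pv_toList_rev, pv_toList_copy,
      pv_ew_append a ['_','r','e','v'], reduceDIte, hsl4,
      pvA_clean a hcl.1 hcl.2]
    simp [h9', hsl9, hcl.1, hcl.2]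
  · -- name = a ++ '_copy_rev'
    rw [pv_ew] at h9; obtain ⟨a, ha⟩ := h9
    have hsl9 : PySem.List.slice name.toList none (some (-9)) = a := by
      rw [← ha]; exact pv_slice9 a _ rfl
    rw [hsl9] at hcl
    have hname : name.toList = (a ++ ['_','c','o','p','y']) ++ ['_','r','e','v'] := by
      rw [← ha]; simp
    have hnr : PySem.Chars.endswith name.toList ['_','r','e','v'] = true := by
      rw [hname]; exact pv_ew_append _ _
    have hsl4 : PySem.List.slice name.toList none (some (-4)) = a ++ ['_','c','o','p','y'] := by
      rw [hname]; exact pv_slice4 _ _ rfl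
    have hic : PySem.Chars.endswith (a ++ ['_','c','o','p','y']) ['_','c','o','p','y'] = true :=
      pv_ew_append _ _
    have hir : PySem.Chars.endswith (a ++ ['_','c','o','p','y']) ['_','r','e','v'] = false := by
      by_contra h; rw [Bool.not_eq_false, pv_ew] at h
      exact pv_conflict _ h (List.suffix_append _ _)
    have hsl5 : PySem.List.slice (a ++ ['_','c','o','p','y']) none (some (-5)) = a :=
      pv_slice5 _ _ rfl
    have hnrc : PySem.Chars.endswith name.toList ['_','r','e','v','_','c','o','p','y'] = false := by
      by_contra h; rw [Bool.not_eq_false, pv_ew] at h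
      have := pv_suffix_eq _ _ _ h ⟨a, ha⟩ (by decide)
      simp at this
    have h9' : PySem.Chars.endswith name.toList ['_','c','o','p','y','_','r','e','v'] = true := by
      rw [pv_ew]; exact ⟨a, ha⟩
    rw [pvA]
    simp only [pv_toList_rev, pv_toList_copy, hnr, reduceDIte, hsl4]
    rw [pvA]
    simp only [pv_toList_rev, pv_toList_copy, hir, Bool.false_eq_true, reduceDIte, hic, hsl5,
      pvA_clean a hcl.1 hcl.2]
    simp [pv_toList_rc, hnrc, h9', hsl9, hcl.1, hcl.2]
  · -- name = a ++ '_rev'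
    rw [pv_ew] at h4; obtain ⟨a, ha⟩ := h4
    have hsl4 : PySem.List.slice name.toList none (some (-4)) = a := by
      rw [← ha]; exact pv_slice4 a _ rfl
    rw [hsl4] at hcl
    have hnr : PySem.Chars.endswith name.toList ['_','r','e','v'] = true := by
      rw [pv_ew]; exact ⟨a, ha⟩
    have hnrc : PySem.Chars.endswith name.toList ['_','r','e','v','_','c','o','p','y'] = false := by
      by_contra h; rw [Bool.not_eq_false, pv_ew] at h
      have h' : ['_','c','o','p','y'] <:+ name.toList := List.IsSuffix.trans (by decide) h
      rw [pv_ew] at hnr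
      exact pv_conflict _ hnr h'
    have hncr : PySem.Chars.endswith name.toList ['_','c','o','p','y','_','r','e','v'] = false := by
      by_contra h; rw [Bool.not_eq_false, pv_ew] at h
      obtain ⟨b, hb⟩ := h
      have hb' : (b ++ ['_','c','o','p','y']) ++ ['_','r','e','v'] = a ++ ['_','r','e','v'] := by
        rw [List.append_assoc]; exact hb.trans ha.symm
      have heq : b ++ ['_','c','o','p','y'] = a := List.append_cancel_right hb'
      have : PySem.Chars.endswith a ['_','c','o','p','y'] = true := by
        rw [← heq]; exact pv_ew_append _ _
      rw [this] at hcl; exact absurd hcl.2 (by simp)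
    rw [pvA]
    simp only [pv_toList_rev, pv_toList_copy, hnr, reduceDIte, hsl4,
      pvA_clean a hcl.1 hcl.2]
    simp [pv_toList_rc, pv_toList_cr, hnrc, hncr, hcl.1, hcl.2]
  · -- name = a ++ '_copy'
    rw [pv_ew] at h5; obtain ⟨a, ha⟩ := h5
    have hsl5 : PySem.List.slice name.toList none (some (-5)) = a := by
      rw [← ha]; exact pv_slice5 a _ rfl
    rw [hsl5] at hcl
    have hnc : PySem.Chars.endswith name.toList ['_','c','o','p','y'] = true := by
      rw [pv_ew]; exact ⟨a, ha⟩
    have hnr : PySem.Chars.endswith name.toList ['_','r','e','v'] = false := by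
      by_contra h; rw [Bool.not_eq_false, pv_ew] at h
      rw [pv_ew] at hnc
      exact pv_conflict _ h hnc
    have hnrc : PySem.Chars.endswith name.toList ['_','r','e','v','_','c','o','p','y'] = false := by
      by_contra h; rw [Bool.not_eq_false, pv_ew] at h
      obtain ⟨b, hb⟩ := h
      have hb' : (b ++ ['_','r','e','v']) ++ ['_','c','o','p','y'] = a ++ ['_','c','o','p','y'] := by
        rw [List.append_assoc]; exact hb.trans ha.symm
      have heq : b ++ ['_','r','e','v'] = a := List.append_cancel_right hb'
      have : PySem.Chars.endswith a ['_','r','e','v'] = true := by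
        rw [← heq]; exact pv_ew_append _ _
      rw [this] at hcl; exact absurd hcl.1 (by simp)
    have hncr : PySem.Chars.endswith name.toList ['_','c','o','p','y','_','r','e','v'] = false := by
      by_contra h; rw [Bool.not_eq_false, pv_ew] at h
      have h' : ['_','r','e','v'] <:+ name.toList := List.IsSuffix.trans (by decide) h
      rw [pv_ew] at hnc
      exact pv_conflict _ h' hnc
    rw [pvA]
    simp only [pv_toList_rev, pv_toList_copy, hnr, Bool.false_eq_true, reduceDIte, hnc, hsl5,
      pvA_clean a hcl.1 hcl.2]
    simp [pv_toList_rc, pv_toList_cr, hnrc, hncr, hcl.1, hcl.2]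

-- ===== VERDICT (by name: the statement is the Claim_ definition above) =====
theorem parse_dataset_name_spec : Claim_equal_parse_dataset_name := by
  intro name _ hpre
  exact parse_dataset_name_spec' name hpre
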